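-- pv_equiv track=rewrite | github.com/AmDeep/PDF-Upload-Test1 | app.py | generate_dynamic_questions
-- ===== SOURCE A (Python) =====
-- def extract_contextual_relationships(text, term, page_info=None):
--     """
--     Analyze the contextual relationships between the user input term
--     and other words in the document to generate contextually rich data.
--     """
--     term = term.lower()
--     sentences = text.split('.')
--     context_data = []
--
--     for sentence in sentences:
--         sentence = sentence.strip()
--         if term in sentence:
--             words = sentence.split()
--             relevant_words = [word for word in words if word not in ["the", "and", "is", "to", "in", "for", "on", "with", "as", "it", "at", "by", "that", "from", "this", "was", "were", "are", "be", "been", "being"]]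
--
--             # Look for related terms based on proximity in the sentence
--             related_terms = [word for word in relevant_words if word != term]
--
--             context_data.append({
--                 "sentence": sentence,
--                 "related_terms": related_terms
--             })
--
--     # If no context found, look for single word occurrences
--     if not context_data and page_info:
--         for page_num, page_text in page_info.items():
--             if term in page_text:
--                 context_data.append({
--                     "sentence": term,  # Single term mention
--                     "related_terms": [],  # No related terms for standalone mention
--                     "page_num": page_num
--                 })
--
--     return context_data
--
-- def generate_dynamic_questions(text, term):
--     term = term.lower()
--
--     # Extract contextual relationships
--     context_data = extract_contextual_relationships(text, term)
--
--     # Generate dynamic questions based on context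
--     questions = []
--     if context_data:
--         questions.append(f"What is mentioned about '{term}' in the document?")
--         questions.append(f"Can you provide examples of '{term}' being discussed in the document?")
--
--         # Check for policy, rules, or definitions
--         if any("requirement" in sentence.lower() for sentence in [entry['sentence'] for entry in context_data]):
--             questions.append(f"What requirements or rules are associated with '{term}'?")
--
--         if any("defined" in sentence.lower() for sentence in [entry['sentence'] for entry in context_data]):
--             questions.append(f"How is '{term}' defined in the document?")
--
--         # Comparative questions if term appears in multiple contexts
--         if len(context_data) > 1:
--             questions.append(f"How does the discussion of '{term}' differ in various sections of the document?")
--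
--     return questions
-- ===== SOURCE B (Python) =====
-- def generate_dynamic_questions(text, term):
--     term = term.lower()
--     # one pass over the sentences: count matches and detect keyword sentences
--     count = 0
--     has_requirement = False
--     has_defined = False
--     for sentence in text.split('.'):
--         sentence = sentence.strip()
--         if term in sentence:
--             count += 1
--             lowered = sentence.lower()
--             has_requirement = has_requirement or ("requirement" in lowered)
--             has_defined = has_defined or ("defined" in lowered)
--     if count == 0:
--         return []
--     return ([f"What is mentioned about '{term}' in the document?",
--              f"Can you provide examples of '{term}' being discussed in the document?"]
--             + ([f"What requirements or rules are associated with '{term}'?"] if has_requirement else [])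
--             + ([f"How is '{term}' defined in the document?"] if has_defined else [])
--             + ([f"How does the discussion of '{term}' differ in various sections of the document?"] if count > 1 else []))
-- ===== Notes on version B (the rewrite author's own statement) =====
-- stated objective: simpler
-- what changed: Replaces the helper that builds a context list of (sentence, related_terms) records plus three separate scans over it (emptiness, any-'requirement', any-'defined', length) with one single pass over text.split('.') maintaining a match counter and two booleans, and assembles the questions by concatenating conditional segments; the unused related_terms bookkeeping and dead page_info branch disappear.
import Mathlib
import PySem

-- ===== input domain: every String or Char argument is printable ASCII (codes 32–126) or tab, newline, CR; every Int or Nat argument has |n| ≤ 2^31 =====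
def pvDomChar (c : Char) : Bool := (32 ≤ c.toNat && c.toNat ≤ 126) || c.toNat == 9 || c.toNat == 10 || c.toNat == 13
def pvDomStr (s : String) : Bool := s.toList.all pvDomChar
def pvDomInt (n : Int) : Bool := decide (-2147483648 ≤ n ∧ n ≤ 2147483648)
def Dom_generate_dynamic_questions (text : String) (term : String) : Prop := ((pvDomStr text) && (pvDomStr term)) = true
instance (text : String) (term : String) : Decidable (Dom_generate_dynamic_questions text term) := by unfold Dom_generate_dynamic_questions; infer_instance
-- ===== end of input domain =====

-- B replaces A's context-record list and its three follow-up scans with one single counting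
-- pass over the sentences and a segment-concatenation build of the questions (objective: simpler).


-- the five f-string questions, shared literal formatting of both Pythons
def pvQ1 (t : String) : String := PySem.Str.join "" ["What is mentioned about '", t, "' in the document?"]
def pvQ2 (t : String) : String := PySem.Str.join "" ["Can you provide examples of '", t, "' being discussed in the document?"]
def pvQ3 (t : String) : String := PySem.Str.join "" ["What requirements or rules are associated with '", t, "'?"]
def pvQ4 (t : String) : String := PySem.Str.join "" ["How is '", t, "' defined in the document?"]
def pvQ5 (t : String) : String := PySem.Str.join "" ["How does the discussion of '", t, "' differ in various sections of the document?"]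

-- ===== PORT A =====
def pvStopwords : List String := ["the", "and", "is", "to", "in", "for", "on", "with", "as", "it", "at", "by", "that", "from", "this", "was", "were", "are", "be", "been", "being"]

-- the loop body's record for one matching (already stripped) sentence:
-- the dict {"sentence": st, "related_terms": …} as the pair (st, related_terms)
def pvEntry (t : String) (st : String) : String × List String :=
  let words := PySem.Str.split₀ st
  let relevant_words := words.filter (fun w => !(pvStopwords.contains w))
  let related_terms := relevant_words.filter (fun w => w != t)
  (st, related_terms)

-- page_info is None at the only call site, so the trailing 'if not context_data and page_info'
-- block never runs (None is falsy); the parameter and that dead block are omitted.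
def extract_contextual_relationships (text : String) (term : String) : List (String × List String) :=
  let t := PySem.Str.lower term
  let sentences := (PySem.Str.split? text ".").getD []
  sentences.foldl (fun acc s =>
    if PySem.Str.isIn t (PySem.Str.strip s) then acc ++ [pvEntry t (PySem.Str.strip s)]
    else acc) []

def generate_dynamic_questions (text : String) (term : String) : List String :=
  let t := PySem.Str.lower term
  let cd := extract_contextual_relationships text t
  let questions : List String := []
  if !cd.isEmpty then
    let questions := questions ++ [pvQ1 t]
    let questions := questions ++ [pvQ2 t]
    let questions := if (cd.map (·.1)).any (fun s => PySem.Str.isIn "requirement" (PySem.Str.lower s))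
      then questions ++ [pvQ3 t] else questions
    let questions := if (cd.map (·.1)).any (fun s => PySem.Str.isIn "defined" (PySem.Str.lower s))
      then questions ++ [pvQ4 t] else questions
    if cd.length > 1 then questions ++ [pvQ5 t] else questions
  else questions

-- ===== PORT B =====
-- B's loop body: bump the counter, accumulate the two keyword flags
def pvStepB (t : String) (acc : Int × Bool × Bool) (s : String) : Int × Bool × Bool :=
  let sent := PySem.Str.strip s
  if PySem.Str.isIn t sent then
    (acc.1 + 1,
     acc.2.1 || PySem.Str.isIn "requirement" (PySem.Str.lower sent),
     acc.2.2 || PySem.Str.isIn "defined" (PySem.Str.lower sent))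
  else acc

def generate_dynamic_questions_alt (text : String) (term : String) : List String :=
  let t := PySem.Str.lower term
  let st := ((PySem.Str.split? text ".").getD []).foldl (pvStepB t) ((0 : Int), false, false)
  if st.1 = 0 then []
  else [pvQ1 t, pvQ2 t]
    ++ (if st.2.1 then [pvQ3 t] else [])
    ++ (if st.2.2 then [pvQ4 t] else [])
    ++ (if st.1 > 1 then [pvQ5 t] else [])

-- ===== PRECONDITION & SPEC =====
def Spec_generate_dynamic_questions (text : String) (term : String) (out : List String) : Prop := out = generate_dynamic_questions_alt text term
instance (text : String) (term : String) (out : List String) : Decidable (Spec_generate_dynamic_questions text term out) := by unfold Spec_generate_dynamic_questions; infer_instance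

-- ===== CLAIM (what is proved, stated in full; the proofs are below) =====
def Claim_equal_generate_dynamic_questions : Prop := ∀ (text : String) (term : String), Dom_generate_dynamic_questions text term → Spec_generate_dynamic_questions text term (generate_dynamic_questions text term)

-- ===== LEMMAS AND PROOFS =====

theorem pvEntry_fst (t st : String) : (pvEntry t st).1 = st := rfl

-- lowerChar is idempotent, so term.lower().lower() == term.lower()
theorem pv_lowerChar_idem (c : Char) : PySem.Chars.lowerChar (PySem.Chars.lowerChar c) = PySem.Chars.lowerChar c := by
  unfold PySem.Chars.lowerChar PySem.Chars.isupper
  by_cases h : ('A' ≤ c ∧ c ≤ 'Z')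
  · have h65 : 65 ≤ c.toNat := Char.le_def.mp h.1
    have h90 : c.toNat ≤ 90 := Char.le_def.mp h.2
    have hv : (c.toNat + 32).isValidChar := by unfold Nat.isValidChar; omega
    have ht : (Char.ofNat (c.toNat + 32)).toNat = c.toNat + 32 := by
      rw [Char.toNat_ofNat, if_pos hv]
    have hz : ¬ (Char.ofNat (c.toNat + 32) ≤ 'Z') := by
      rw [Char.le_def, UInt32.le_iff_toNat_le]
      show ¬ (Char.ofNat (c.toNat + 32)).toNat ≤ (90 : Nat)
      omega
    simp [h.1, h.2, hz]
  · have h' : ¬ ('A' ≤ c) ∨ ¬ (c ≤ 'Z') := by tauto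
    rcases h' with h1 | h1 <;> simp [h1]

theorem pv_lower_idem (s : String) : PySem.Str.lower (PySem.Str.lower s) = PySem.Str.lower s := by
  have h : ∀ l : List Char, PySem.Chars.lower (PySem.Chars.lower l) = PySem.Chars.lower l := by
    intro l; unfold PySem.Chars.lower; rw [List.map_map]
    exact List.map_congr_left (fun c _ => pv_lowerChar_idem c)
  simp [PySem.Str.lower, h]

-- B's counting fold, characterised over the filtered sentence list
theorem pv_bfold (t : String) (l : List String) (c : Int) (r d : Bool) :
    l.foldl (pvStepB t) (c, r, d)
    = (c + ((l.filter (fun s => PySem.Str.isIn t (PySem.Str.strip s))).length : Int),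
       r || (l.filter (fun s => PySem.Str.isIn t (PySem.Str.strip s))).any
              (fun s => PySem.Str.isIn "requirement" (PySem.Str.lower (PySem.Str.strip s))),
       d || (l.filter (fun s => PySem.Str.isIn t (PySem.Str.strip s))).any
              (fun s => PySem.Str.isIn "defined" (PySem.Str.lower (PySem.Str.strip s)))) := by
  induction l generalizing c r d with
  | nil => simp
  | cons x xs ih =>
    rw [List.foldl_cons]
    by_cases h : PySem.Str.isIn t (PySem.Str.strip x) = true
    · rw [show pvStepB t (c, r, d) x =
          (c + 1, r || PySem.Str.isIn "requirement" (PySem.Str.lower (PySem.Str.strip x)),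
                  d || PySem.Str.isIn "defined" (PySem.Str.lower (PySem.Str.strip x)))
          from by simp only [pvStepB]; rw [if_pos h], ih]
      simp only [List.filter_cons, h, if_true, List.length_cons, List.any_cons, Nat.cast_add,
        Nat.cast_one, Prod.mk.injEq]
      exact ⟨by ring, by rw [Bool.or_assoc], by rw [Bool.or_assoc]⟩
    · rw [show pvStepB t (c, r, d) x = (c, r, d)
          from by simp only [pvStepB]; rw [if_neg h], ih]
      simp only [List.filter_cons, h, Bool.false_eq_true, if_false]

-- A's context list is the matching stripped sentences with their related-word records
theorem pv_afold (text t : String) :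
    extract_contextual_relationships text t
    = (((PySem.Str.split? text ".").getD []).filter
          (fun s => PySem.Str.isIn (PySem.Str.lower t) (PySem.Str.strip s))).map
        (fun s => pvEntry (PySem.Str.lower t) (PySem.Str.strip s)) := by
  unfold extract_contextual_relationships
  exact PySem.List.foldl_append_if _ _ _ []

-- ===== VERDICT (by name: the statement is the Claim_ definition above) =====
theorem generate_dynamic_questions_spec : Claim_equal_generate_dynamic_questions := by
  intro text term _
  unfold Spec_generate_dynamic_questions
  simp only [generate_dynamic_questions, generate_dynamic_questions_alt]
  rw [pv_afold, pv_lower_idem, pv_bfold]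
  set t := PySem.Str.lower term with ht
  set m := ((PySem.Str.split? text ".").getD []).filter
      (fun s => PySem.Str.isIn t (PySem.Str.strip s)) with hm
  by_cases hme : m = []
  · simp [hme]
  · have hlen : 0 < m.length := List.length_pos_of_ne_nil hme
    have hie : (m.map (fun s => pvEntry t (PySem.Str.strip s))).isEmpty = false := by
      simp [hme]
    simp only [hie, Bool.not_false, if_true, List.map_map, List.any_map, Function.comp_def,
      pvEntry_fst, List.length_map, zero_add, Bool.false_or, List.nil_append]
    rw [if_neg (show ¬ ((m.length : Int) = 0) by omega)]
    simp only [gt_iff_lt, show ((1:Int) < (m.length : Int)) = (1 < m.length) from by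
      simp [Nat.one_lt_cast]]
    split_ifs <;> simp
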